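-- pv_equiv track=rewrite | github.com/ebehlmann/advent_of_python | 2017/day_4/day_4.py | check_for_validity
-- ===== SOURCE A (Python) =====
-- def alphabetize_letters(word):
-- 	letters = list(word)
-- 	sorted_letters = sorted(letters)
-- 	return ''.join(sorted_letters)
--
-- def check_for_validity(passphrase, problem_number):
-- 	if(problem_number == 2):
-- 		k = 0
-- 		while(k<len(passphrase)):
-- 			passphrase[k] = alphabetize_letters(passphrase[k])
-- 			k += 1
--
-- 	i = 0
-- 	j = 0
--
-- 	while(i<len(passphrase)):
-- 		while(j<len(passphrase)):
-- 			if(i != j):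
-- 				if(passphrase[i] == passphrase[j]):
-- 					return False
-- 			j += 1
-- 		i += 1
-- 		j = 0
--
-- 	return True
-- ===== SOURCE B (Python) =====
-- def check_for_validity(passphrase, problem_number):
--     if problem_number == 2:
--         k = 0
--         while k < len(passphrase):
--             passphrase[k] = ''.join(sorted(passphrase[k]))
--             k += 1
--     words = sorted(passphrase)
--     for k in range(1, len(words)):
--         if words[k] == words[k - 1]:
--             return False
--     return True
-- ===== Notes on version B (the rewrite author's own statement) =====
-- stated objective: faster
-- what changed: Replaces A's O(n^2) nested i/j pairwise scan with sorting a copy of the list and a single adjacent-equality pass; the in-place alphabetize step for problem_number==2 is kept.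
import Mathlib
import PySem

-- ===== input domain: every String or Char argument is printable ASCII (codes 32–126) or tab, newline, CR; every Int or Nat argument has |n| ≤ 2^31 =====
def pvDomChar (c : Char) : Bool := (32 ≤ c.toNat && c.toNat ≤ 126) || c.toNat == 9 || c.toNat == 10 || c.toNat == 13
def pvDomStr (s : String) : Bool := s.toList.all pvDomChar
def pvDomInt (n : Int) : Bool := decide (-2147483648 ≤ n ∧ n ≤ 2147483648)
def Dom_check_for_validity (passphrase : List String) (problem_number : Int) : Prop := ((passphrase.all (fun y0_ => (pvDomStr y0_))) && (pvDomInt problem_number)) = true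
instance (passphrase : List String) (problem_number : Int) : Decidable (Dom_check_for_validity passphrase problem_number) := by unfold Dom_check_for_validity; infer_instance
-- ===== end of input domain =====

-- B replaces A's O(n^2) nested pairwise scan with sort-then-adjacent-compare (faster per the
-- timing run's measurement mechanism: asymptotically fewer comparisons); A mutates the list
-- in place when problem_number == 2 and B performs the same mutation, so only the return value
-- is at issue here.

-- ===== PORT A =====
def alphabetize_letters (word : String) : String :=
  String.ofList (PySem.List.sorted word.toList (fun c => c) false)

-- inner 'while j < len(passphrase)' loop: true = a duplicate of index i was found (A returns False)
def pvAInner (ps : List String) (i j : Nat) : Bool :=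
  if j < ps.length then
    (if i ≠ j ∧ ps.getD i "" = ps.getD j "" then true else pvAInner ps i (j + 1))
  else false
termination_by ps.length - j

-- outer 'while i < len(passphrase)' loop
def pvAOuter (ps : List String) (i : Nat) : Bool :=
  if i < ps.length then
    (if pvAInner ps i 0 then false else pvAOuter ps (i + 1))
  else true
termination_by ps.length - i

def check_for_validity (passphrase : List String) (problem_number : Int) : Bool :=
  let ps := if problem_number == 2 then passphrase.map alphabetize_letters else passphrase
  pvAOuter ps 0

-- ===== PORT B =====
-- 'for k in range(1, len(words)): if words[k] == words[k-1]: return False' — adjacent scan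
def pvBScan : List String → Bool
  | a :: b :: t => if a == b then false else pvBScan (b :: t)
  | _ => true

def check_for_validity_alt (passphrase : List String) (problem_number : Int) : Bool :=
  let ps := if problem_number == 2 then passphrase.map alphabetize_letters else passphrase
  pvBScan (PySem.List.sorted ps (fun x => x) false)

-- ===== PRECONDITION & SPEC =====
def Spec_check_for_validity (passphrase : List String) (problem_number : Int) (out : Bool) : Prop := out = check_for_validity_alt passphrase problem_number
instance (passphrase : List String) (problem_number : Int) (out : Bool) : Decidable (Spec_check_for_validity passphrase problem_number out) := by unfold Spec_check_for_validity; infer_instance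

-- ===== CLAIM (what is proved, stated in full; the proofs are below) =====
def Claim_equal_check_for_validity : Prop := ∀ (passphrase : List String) (problem_number : Int), Dom_check_for_validity passphrase problem_number → Spec_check_for_validity passphrase problem_number (check_for_validity passphrase problem_number)

-- ===== LEMMAS AND PROOFS =====

theorem pvAInner_iff (ps : List String) (i j : Nat) :
    pvAInner ps i j = true ↔ ∃ k, j ≤ k ∧ k < ps.length ∧ i ≠ k ∧ ps.getD i "" = ps.getD k "" := by
  induction j using pvAInner.induct (ps := ps) (i := i) with
  | case1 j hj hdup =>
    rw [pvAInner, if_pos hj, if_pos hdup]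
    exact ⟨fun _ => ⟨j, le_refl j, hj, hdup.1, hdup.2⟩, fun _ => rfl⟩
  | case2 j hj hdup ih =>
    rw [pvAInner, if_pos hj, if_neg hdup, ih]
    constructor
    · rintro ⟨k, hk1, hk2, hk3, hk4⟩; exact ⟨k, by omega, hk2, hk3, hk4⟩
    · rintro ⟨k, hk1, hk2, hk3, hk4⟩
      refine ⟨k, ?_, hk2, hk3, hk4⟩
      rcases Nat.eq_or_lt_of_le hk1 with h | h
      · exact absurd (h ▸ ⟨hk3, hk4⟩) hdup
      · omega
  | case3 j hj =>
    rw [pvAInner, if_neg hj]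
    simp only [Bool.false_eq_true, false_iff]
    rintro ⟨k, hk1, hk2, _, _⟩; omega

theorem pvAOuter_iff (ps : List String) (i : Nat) :
    pvAOuter ps i = true ↔ ∀ m, i ≤ m → m < ps.length → pvAInner ps m 0 = false := by
  induction i using pvAOuter.induct (ps := ps) with
  | case1 i hi hfound =>
    rw [pvAOuter, if_pos hi, if_pos hfound]
    simp only [Bool.false_eq_true, false_iff, not_forall]
    exact ⟨i, le_refl i, hi, by simp [hfound]⟩
  | case2 i hi hfound ih =>
    rw [pvAOuter, if_pos hi, if_neg hfound, ih]
    constructor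
    · intro h m hm1 hm2
      rcases Nat.eq_or_lt_of_le hm1 with h' | h'
      · subst h'; exact Bool.eq_false_iff.mpr hfound
      · exact h m h' hm2
    · intro h m hm1 hm2; exact h m (by omega) hm2
  | case3 i hi =>
    rw [pvAOuter, if_neg hi]
    simp only [true_iff]
    intro m hm1 hm2; omega

theorem nodup_iff_getD (ps : List String) :
    ps.Nodup ↔ ∀ i j, i < ps.length → j < ps.length → i ≠ j → ps.getD i "" ≠ ps.getD j "" := by
  rw [List.nodup_iff_injective_get]
  constructor
  · intro hinj i j hi hj hne heq
    rw [List.getD_eq_getElem ps "" hi, List.getD_eq_getElem ps "" hj] at heq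
    have h2 : (⟨i, hi⟩ : Fin ps.length) = ⟨j, hj⟩ :=
      hinj (by simpa [List.get_eq_getElem] using heq)
    exact hne (by simpa using h2)
  · rintro h ⟨i, hi⟩ ⟨j, hj⟩ heq
    by_contra hne
    exact h i j hi hj (by simpa using hne)
      (by rw [List.getD_eq_getElem ps "" hi, List.getD_eq_getElem ps "" hj]; exact heq)

theorem pvAOuter_eq_nodup (ps : List String) : pvAOuter ps 0 = decide ps.Nodup := by
  by_cases h : ps.Nodup
  · simp only [h, decide_true]
    rw [pvAOuter_iff]
    intro m _ hm
    rw [Bool.eq_false_iff, Ne, pvAInner_iff]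
    rintro ⟨k, _, hk2, hk3, hk4⟩
    exact (nodup_iff_getD ps).mp h m k hm hk2 hk3 hk4
  · simp only [h, decide_false]
    rw [Bool.eq_false_iff, Ne, pvAOuter_iff]
    intro hall
    apply h
    rw [nodup_iff_getD]
    intro i j hi hj hne heq
    have := hall i (Nat.zero_le i) hi
    rw [Bool.eq_false_iff, Ne, pvAInner_iff] at this
    exact this ⟨j, Nat.zero_le j, hj, hne, heq⟩

theorem pvBScan_eq_nodup (zs : List String) (hs : zs.Pairwise (· ≤ ·)) :
    pvBScan zs = decide zs.Nodup := by
  induction zs with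
  | nil => simp [pvBScan]
  | cons a t ih =>
    cases t with
    | nil => simp [pvBScan]
    | cons b t' =>
      rw [pvBScan]
      by_cases hab : a = b
      · simp only [hab, beq_self_eq_true, if_true]
        have : ¬ (b :: b :: t').Nodup := by simp
        simp [this]
      · rw [if_neg (by simpa using hab), ih hs.of_cons]
        have halt : a < b := lt_of_le_of_ne (List.rel_of_pairwise_cons hs (List.mem_cons_self ..)) hab
        have hnotmem : a ∉ b :: t' := by
          intro hmem
          rcases List.mem_cons.mp hmem with h | h
          · exact hab h
          · exact absurd (List.rel_of_pairwise_cons hs.of_cons h) (not_le.mpr halt)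
        simp [List.nodup_cons, hnotmem]

theorem check_eq (ps : List String) :
    pvAOuter ps 0 = pvBScan (PySem.List.sorted ps (fun x => x) false) := by
  rw [pvAOuter_eq_nodup, pvBScan_eq_nodup _ (by simpa using PySem.List.sorted_pairwise ps (fun x => x))]
  congr 1
  exact propext ((PySem.List.sorted_perm ps (fun x => x) false).nodup_iff).symm

-- ===== VERDICT (by name: the statement is the Claim_ definition above) =====
theorem check_for_validity_spec : Claim_equal_check_for_validity := by
  intro passphrase problem_number _
  unfold Spec_check_for_validity check_for_validity check_for_validity_alt
  exact check_eq _
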